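-- pv_equiv track=rewrite | github.com/bemagee/LearnPython | Python Course CSe11309x/midterm_part7.py | pattern_sum
-- ===== SOURCE A (Python) =====
-- def pattern_sum(a, b):
--     sum_total = 0
--     string_hold = ''
--     string_list = []
--     for i in range(1, b+1) :
--         string_hold = str(a) * i
--         string_list.append(string_hold)
--     for item in string_list :
--         sum_total += int(item)
--     return(sum_total)
-- ===== SOURCE B (Python) =====
-- def pattern_sum(a, b):
--     sum_total = 0
--     rep = ''
--     piece = str(a)
--     for _ in range(b):
--         rep += piece
--         sum_total += int(rep)
--     return sum_total
-- ===== Notes on version B (the rewrite author's own statement) =====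
-- stated objective: simpler
-- what changed: one pass that grows the repeated string incrementally (rep += piece) and accumulates the running total, instead of building a list of str(a)*i strings with repeated string multiplication and summing it in a second loop
import Mathlib
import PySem

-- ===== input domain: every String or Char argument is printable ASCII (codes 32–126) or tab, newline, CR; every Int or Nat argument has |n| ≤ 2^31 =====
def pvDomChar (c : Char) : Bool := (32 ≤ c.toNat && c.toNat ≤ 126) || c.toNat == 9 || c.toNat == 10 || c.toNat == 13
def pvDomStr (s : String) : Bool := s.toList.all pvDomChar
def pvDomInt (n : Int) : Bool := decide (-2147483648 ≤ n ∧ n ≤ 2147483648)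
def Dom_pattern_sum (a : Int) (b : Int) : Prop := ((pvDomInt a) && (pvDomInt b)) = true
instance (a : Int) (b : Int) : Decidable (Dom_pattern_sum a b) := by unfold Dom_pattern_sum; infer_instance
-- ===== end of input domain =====

-- B replaces A's build-a-list-of-str(a)*i-then-sum double pass by one pass that grows the
-- repeated string incrementally and accumulates the running total (same return value).

-- ===== PORT A =====
-- strings are ported on the List Char side; int(item) is PySem.Int.ofChars?, which is `none`
-- exactly where Python's int() raises ValueError — those inputs are excluded by Pre_ below,
-- and the port returns the parse's `getD 0` there (outside Pre_ nothing is claimed).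
def pattern_sum (a : Int) (b : Int) : Int :=
  let string_list :=
    (PySem.List.pyRange 1 (b + 1)).foldl
      (fun acc i => acc ++ [PySem.List.pyRepeat (PySem.Int.toChars a) i]) []
  string_list.foldl (fun sum_total item => sum_total + (PySem.Int.ofChars? item).getD 0) 0

-- ===== PORT B =====
def pattern_sum_alt (a : Int) (b : Int) : Int :=
  let piece := PySem.Int.toChars a
  ((PySem.List.pyRange 0 b).foldl
      (fun (st : Int × List Char) _ =>
        let rep := st.2 ++ piece
        (st.1 + (PySem.Int.ofChars? rep).getD 0, rep))
      ((0 : Int), ([] : List Char))).1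

-- ===== PRECONDITION & SPEC =====
-- Python A raises ValueError when a < 0 and b ≥ 2: str(a)*i for i ≥ 2 ("-5-5…") is not int-parsable.
def Pre_pattern_sum (a : Int) (b : Int) : Prop := 0 ≤ a ∨ b ≤ 1
instance (a : Int) (b : Int) : Decidable (Pre_pattern_sum a b) := by unfold Pre_pattern_sum; infer_instance
def pvWitness_pattern_sum : Int × Int := (7, 3)

def Spec_pattern_sum (a : Int) (b : Int) (out : Int) : Prop := out = pattern_sum_alt a b
instance (a : Int) (b : Int) (out : Int) : Decidable (Spec_pattern_sum a b out) := by unfold Spec_pattern_sum; infer_instance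

-- ===== CLAIM (what is proved, stated in full; the proofs are below) =====
def Claim_equal_pattern_sum : Prop := ∀ (a : Int) (b : Int), Dom_pattern_sum a b → Pre_pattern_sum a b → Spec_pattern_sum a b (pattern_sum a b)

-- ===== LEMMAS AND PROOFS =====

theorem pv_rep_succ (s : List Char) (k : Nat) :
    PySem.List.pyRepeat s ((k : Int) + 1) = PySem.List.pyRepeat s (k : Int) ++ s := by
  have h1 : ((k : Int) + 1).toNat = k + 1 := by omega
  have h2 : ((k : Int)).toNat = k := by omega
  simp [PySem.List.pyRepeat, h1, h2, List.replicate_succ']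
theorem pv_rep_zero (s : List Char) : PySem.List.pyRepeat s (0 : Int) = [] := by
  simp [PySem.List.pyRepeat]
theorem pv_range_shift (m : Nat) (a : Int) :
    PySem.List.pyRange a (a + m) = (List.range m).map (fun k : Nat => a + (k : Int)) := by
  induction m generalizing a with
  | zero => simp [PySem.List.pyRange_one_eq_nil]
  | succ m ih =>
      rw [PySem.List.pyRange_one_cons (by omega : a < a + ((m : Nat) + 1 : Nat))]
      have hsh : a + ((m + 1 : Nat) : Int) = (a + 1) + (m : Int) := by push_cast; ring
      rw [hsh, ih (a + 1), List.range_succ_eq_map, List.map_cons, List.map_map]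
      congr 1
      · norm_num
      · exact List.map_congr_left (fun k _ => by
          simp [Function.comp, Nat.succ_eq_add_one]; ring)
theorem pv_bfold {ι : Type} (s : List Char) (l : List ι) (t : Int) (k : Nat) :
    l.foldl
      (fun (st : Int × List Char) _ =>
        (st.1 + (PySem.Int.ofChars? (st.2 ++ s)).getD 0, st.2 ++ s))
      (t, PySem.List.pyRepeat s (k : Int))
    = (t + ((List.range l.length).map
          (fun j : Nat => (PySem.Int.ofChars? (PySem.List.pyRepeat s (((k + 1 + j : Nat) : Int)))).getD 0)).sum,
       PySem.List.pyRepeat s (((k + l.length : Nat) : Int))) := by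
  induction l generalizing t k with
  | nil => simp
  | cons h tl ih =>
      simp only [List.foldl_cons]
      rw [← pv_rep_succ s k]
      have hk1 : ((k : Int) + 1) = ((k + 1 : Nat) : Int) := by push_cast; ring
      rw [hk1, ih]
      simp only [Prod.mk.injEq, List.length_cons, List.range_succ_eq_map, List.map_cons,
        List.map_map, List.sum_cons]
      constructor
      · rw [add_assoc]
        congr 1
        congr 1
        exact congrArg List.sum (List.map_congr_left (fun j _ => by
          have hj : k + 1 + 1 + j = k + 1 + j.succ := by omega
          simp [Function.comp_apply, hj]))
      · have hl : k + 1 + tl.length = k + (tl.length + 1) := by omega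
        simp [hl]
theorem pv_main (a b : Int) : pattern_sum a b = pattern_sum_alt a b := by
  unfold pattern_sum pattern_sum_alt
  by_cases hb : 0 ≤ b
  · obtain ⟨n, rfl⟩ : ∃ n : Nat, b = (n : Int) := ⟨b.toNat, by omega⟩
    have h1 : PySem.List.pyRange 1 ((n : Int) + 1) = (List.range n).map (fun k : Nat => 1 + (k : Int)) := by
      rw [show ((n : Int) + 1) = 1 + (n : Int) by ring]
      exact pv_range_shift n 1
    have h0 : PySem.List.pyRange 0 (n : Int) = (List.range n).map (fun k : Nat => (0 : Int) + (k : Int)) := by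
      have := pv_range_shift n 0
      simpa using this
    rw [h1, h0]
    rw [PySem.List.foldl_append_singleton_eq_map, List.nil_append, PySem.List.foldl_add]
    simp only [List.foldl_map]
    have hstart : ((0 : Int), ([] : List Char))
        = ((0 : Int), PySem.List.pyRepeat (PySem.Int.toChars a) ((0 : Nat) : Int)) := by
      simp [pv_rep_zero]
    rw [hstart, pv_bfold]
    simp only [List.map_map, List.length_range]
    congr 1
  · have hA : PySem.List.pyRange 1 (b + 1) = [] := PySem.List.pyRange_one_eq_nil (by omega)
    have hB : PySem.List.pyRange 0 b = [] := PySem.List.pyRange_one_eq_nil (by omega)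
    rw [hA, hB]
    simp

-- ===== VERDICT (by name: the statement is the Claim_ definition above) =====
theorem pattern_sum_spec : Claim_equal_pattern_sum := by
  intro a b _ _
  exact pv_main a b
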